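-- pv_equiv track=rewrite | github.com/rufex/bookleter | bookleter.py | reorder_pages
-- ===== SOURCE A (Python) =====
-- from collections import deque
--
-- def reorder_pages(pages_nr: int):
--
--     if pages_nr % 4 == 0:
--         pairs = int(pages_nr/2)
--     else:
--         raise Exception('The number of pages should be a divisible by 4.')
--
--     pages = deque()
--
--     for i in range(1,pages_nr+1):
--         pages.append(i)
--
--     ordered_list = []
--
--     for i in range(0,pairs):
--         pair = []
--         # Pair
--         if i % 2 == 0:
--             pair.append(pages.pop())
--             pair.append(pages.popleft())
--         # Odd
--         else:
--             pair.append(pages.popleft())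
--             pair.append(pages.pop())
--         ordered_list.append(pair)
--
--     return ordered_list
-- ===== SOURCE B (Python) =====
-- def reorder_pages(pages_nr: int):
--
--     if pages_nr % 4 != 0:
--         raise Exception('The number of pages should be a divisible by 4.')
--
--     pairs = pages_nr // 2
--     return [[pages_nr - i, i + 1] if i % 2 == 0 else [i + 1, pages_nr - i]
--             for i in range(pairs)]
-- ===== Notes on version B (the rewrite author's own statement) =====
-- stated objective: simpler
-- what changed: Replaces the deque built from range(1,n+1) and the alternating pop/popleft loop by a closed-form comprehension: pair i is [n-i, i+1] for even i and [i+1, n-i] for odd i, so no deque and no mutation are needed.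
import Mathlib
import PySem

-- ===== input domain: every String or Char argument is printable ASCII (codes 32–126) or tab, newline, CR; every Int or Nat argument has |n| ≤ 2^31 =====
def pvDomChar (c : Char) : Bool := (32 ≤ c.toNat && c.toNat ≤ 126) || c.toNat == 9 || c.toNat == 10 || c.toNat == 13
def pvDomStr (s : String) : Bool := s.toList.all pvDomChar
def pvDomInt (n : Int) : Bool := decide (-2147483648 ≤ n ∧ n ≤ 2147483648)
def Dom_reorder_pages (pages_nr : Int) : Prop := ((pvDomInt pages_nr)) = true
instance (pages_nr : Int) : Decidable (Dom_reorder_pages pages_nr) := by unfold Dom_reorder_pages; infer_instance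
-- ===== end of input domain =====

-- B replaces A's deque with alternating two-ended pops by a closed-form pair formula (simpler, no mutation).

-- ===== PORT A =====
-- one iteration of A's ordering loop: state is (pages deque as a list, ordered_list)
def reorderStepA (st : List Int × List (List Int)) (i : Int) : List Int × List (List Int) :=
  let pages := st.1
  let ordered := st.2
  if PySem.Int.mod i 2 = 0 then
    -- pair.append(pages.pop()); pair.append(pages.popleft())
    let pair := [pages.getLastD 0, pages.dropLast.headD 0]
    (pages.dropLast.tail, ordered ++ [pair])
  else
    -- pair.append(pages.popleft()); pair.append(pages.pop())
    let pair := [pages.headD 0, pages.tail.getLastD 0]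
    (pages.tail.dropLast, ordered ++ [pair])

def reorder_pages (pages_nr : Int) : List (List Int) :=
  let pairs := PySem.Int.truncdiv pages_nr 2          -- int(pages_nr/2), exact on the admitted domain
  let pages := PySem.List.pyRange 1 (pages_nr + 1) 1
  ((PySem.List.pyRange 0 pairs 1).foldl reorderStepA (pages, [])).2

-- ===== PORT B =====
def reorder_pages_alt (pages_nr : Int) : List (List Int) :=
  let pairs := PySem.Int.floordiv pages_nr 2
  (PySem.List.pyRange 0 pairs 1).map (fun i =>
    if PySem.Int.mod i 2 = 0 then [pages_nr - i, i + 1] else [i + 1, pages_nr - i])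

-- ===== PRECONDITION & SPEC =====
-- A raises Exception exactly when pages_nr % 4 != 0; those inputs are excluded.
def Pre_reorder_pages (pages_nr : Int) : Prop := PySem.Int.mod pages_nr 4 = 0
instance (pages_nr : Int) : Decidable (Pre_reorder_pages pages_nr) := by unfold Pre_reorder_pages; infer_instance

def pvWitness_reorder_pages : Int := (8)

def Spec_reorder_pages (pages_nr : Int) (out : List (List Int)) : Prop := out = reorder_pages_alt pages_nr
instance (pages_nr : Int) (out : List (List Int)) : Decidable (Spec_reorder_pages pages_nr out) := by unfold Spec_reorder_pages; infer_instance

-- ===== CLAIM (what is proved, stated in full; the proofs are below) =====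
def Claim_equal_reorder_pages : Prop := ∀ (pages_nr : Int), Dom_reorder_pages pages_nr → Pre_reorder_pages pages_nr → Spec_reorder_pages pages_nr (reorder_pages pages_nr)

-- ===== LEMMAS AND PROOFS =====

-- abbreviation for B's pair formula
def pairB (n i : Int) : List Int :=
  if PySem.Int.mod i 2 = 0 then [n - i, i + 1] else [i + 1, n - i]

lemma pyRange_one_empty {a b : Int} (h : b ≤ a) : PySem.List.pyRange a b 1 = [] := by
  simp [PySem.List.pyRange]
  intro h'
  omega

-- loop invariant: starting at index s with pages = [s+1 .. n-s], m more iterations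
-- consume one element from each end per step and append pairB n i.
lemma loop_inv (n : Int) : ∀ (m : Nat) (s : Int) (acc : List (List Int)),
    2 * (s + m) ≤ n → 0 ≤ s →
    (PySem.List.pyRange s (s + m) 1).foldl reorderStepA
        (PySem.List.pyRange (s + 1) (n - s + 1) 1, acc)
      = (PySem.List.pyRange (s + m + 1) (n - (s + m) + 1) 1,
         acc ++ (PySem.List.pyRange s (s + m) 1).map (pairB n)) := by
  intro m
  induction m with
  | zero =>
    intro s acc _ _
    simp [pyRange_one_empty (le_refl s)]
  | succ m ih =>
    intro s acc hm hs
    have hlt : s < s + (m + 1 : Nat) := by push_cast; omega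
    rw [PySem.List.pyRange_one_cons hlt]
    have hcast : s + (m + 1 : Nat) = (s + 1) + (m : Nat) := by push_cast; ring
    -- compute one step: pages = [s+1 .. n-s], which is pyRange (s+1) (n-s) 1 ++ [n-s]
    have hsplit : PySem.List.pyRange (s + 1) (n - s + 1) 1
        = PySem.List.pyRange (s + 1) (n - s) 1 ++ [n - s] := by
      exact PySem.List.pyRange_one_succ_right (by omega)
    have htail : (PySem.List.pyRange (s + 1) (n - s + 1) 1).tail
        = PySem.List.pyRange (s + 2) (n - s + 1) 1 := by
      rw [PySem.List.pyRange_one_cons (by omega : s + 1 < n - s + 1)]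
      simp
      ring_nf
    have hhead : (PySem.List.pyRange (s + 1) (n - s + 1) 1).headD 0 = s + 1 := by
      rw [PySem.List.pyRange_one_cons (by omega : s + 1 < n - s + 1)]; rfl
    have hstep : reorderStepA (PySem.List.pyRange (s + 1) (n - s + 1) 1, acc) s
        = (PySem.List.pyRange (s + 2) (n - s + 1 - 1) 1, acc ++ [pairB n s]) := by
      by_cases hpar : PySem.Int.mod s 2 = 0
      · -- even: pop then popleft
        have hdl : (PySem.List.pyRange (s + 1) (n - s + 1) 1).dropLast
            = PySem.List.pyRange (s + 1) (n - s) 1 := by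
          rw [hsplit]; exact List.dropLast_concat
        have hlast : (PySem.List.pyRange (s + 1) (n - s + 1) 1).getLastD 0 = n - s := by
          rw [hsplit]; simp
        have hdh : (PySem.List.pyRange (s + 1) (n - s) 1).headD 0 = s + 1 := by
          rw [PySem.List.pyRange_one_cons (by omega : s + 1 < n - s)]; rfl
        have hdt : (PySem.List.pyRange (s + 1) (n - s) 1).tail
            = PySem.List.pyRange (s + 2) (n - s) 1 := by
          rw [PySem.List.pyRange_one_cons (by omega : s + 1 < n - s)]
          simp; ring_nf
        simp only [reorderStepA, hpar, if_pos, pairB]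
        rw [hdl, hlast, hdh, hdt]
        simp
      · -- odd: popleft then pop
        have htl : (PySem.List.pyRange (s + 2) (n - s + 1) 1).getLastD 0 = n - s := by
          rw [show PySem.List.pyRange (s + 2) (n - s + 1) 1
              = PySem.List.pyRange (s + 2) (n - s) 1 ++ [n - s] from
            PySem.List.pyRange_one_succ_right (by omega)]
          simp
        have htdl : (PySem.List.pyRange (s + 2) (n - s + 1) 1).dropLast
            = PySem.List.pyRange (s + 2) (n - s) 1 := by
          rw [show PySem.List.pyRange (s + 2) (n - s + 1) 1
              = PySem.List.pyRange (s + 2) (n - s) 1 ++ [n - s] from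
            PySem.List.pyRange_one_succ_right (by omega)]
          exact List.dropLast_concat
        simp only [reorderStepA, hpar, pairB]
        rw [htail, hhead, htl, htdl]
        simp
    rw [List.foldl_cons, hstep,
        show n - s + 1 - 1 = n - (s + 1) + 1 by ring,
        show s + (2 : Int) = s + 1 + 1 by ring, hcast]
    rw [ih (s + 1) (acc ++ [pairB n s]) (by push_cast at hm ⊢; omega) (by omega)]
    simp

-- ===== VERDICT (by name: the statement is the Claim_ definition above) =====
theorem reorder_pages_spec : Claim_equal_reorder_pages := by
  intro n _ hpre
  unfold Spec_reorder_pages reorder_pages reorder_pages_alt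
  have hdvd : (4 : Int) ∣ n := (PySem.Int.mod_eq_zero_iff_dvd n 4).mp hpre
  obtain ⟨k, hk⟩ := hdvd
  have htd : PySem.Int.truncdiv n 2 = 2 * k := by
    subst hk
    simp [PySem.Int.truncdiv, show (4 : Int) * k = (2 * k) * 2 by ring, Int.mul_tdiv_cancel]
  have hfd : PySem.Int.floordiv n 2 = 2 * k := by
    rw [PySem.Int.floordiv_eq_ediv_of_pos (by omega)]
    omega
  simp only [htd, hfd]
  by_cases hkpos : 0 < k
  · have hm : (2 * k) = ((2 * k).toNat : Int) := by omega
    have := loop_inv n ((2 * k).toNat) 0 []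
      (by omega) (le_refl 0)
    simp only [zero_add, ← hm] at this
    rw [show n - 0 + 1 = n + 1 by ring] at this
    rw [this]
    simp [pairB]
  · rw [pyRange_one_empty (by omega : (2 : Int) * k ≤ 0)]
    simp
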